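-- pv_equiv track=rewrite | github.com/hedb/misc_py | codility1.py | solution
-- ===== SOURCE A (Python) =====
-- def solution(A):
--
--     if len(A) < 2:
--         return -1
--
--     A1 = []
--     for i,v in enumerate(A):
--         A1.append((i,v))
--
--     A1 = sorted( A1, key=lambda elem: elem[1] )
--
--     adjacent_pairs = []
--     prev = current = next_current = None
--
--     for e in A1:
--         if current == None:
--             current = [e]; continue
--         elif e[1] == current[0][1]:
--             current.append(e)
--         else:
--             next_current = [e]
--             # met new value
--             if prev != None:
--                 for x in prev:
--                     for y in current:
--                         adjacent_pairs.append( (x[0],y[0]) )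
--
--             prev = current
--             current = next_current
--     # closing term
--     if prev!=None:
--         for x in prev:
--             for y in current:
--                 adjacent_pairs.append((x[0], y[0]))
--
--
--     min_pair = None
--     for e in adjacent_pairs:
--         if   min_pair == None  or abs(e[0]-e[1])<min_pair :
--             min_pair = abs(e[0]-e[1])
--
--     if min_pair==None:
--         min_pair = -1
--
--     return min_pair
-- ===== SOURCE B (Python) =====
-- def _chunk(pairs):
--     """Split the value-sorted (index, value) list into maximal runs of equal
--     value; each run becomes its list of indices."""
--     groups = []
--     k = 0
--     n = len(pairs)
--     while k < n:
--         v = pairs[k][1]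
--         j = k
--         while j < n and pairs[j][1] == v:
--             j += 1
--         groups.append([i for i, _ in pairs[k:j]])
--         k = j
--     return groups
--
--
-- def _merge_min(xs, ys, best):
--     """Minimum |x - y| over the cross product of two sorted index lists by a
--     linear merge walk; best carries the minimum so far (-1 = none yet)."""
--     i = j = 0
--     while i < len(xs) and j < len(ys):
--         d = abs(xs[i] - ys[j])
--         if best == -1 or d < best:
--             best = d
--         if xs[i] < ys[j]:
--             i += 1
--         else:
--             j += 1
--     return best
--
--
-- def solution(A):
--     if len(A) < 2:
--         return -1
--     pairs = sorted(enumerate(A), key=lambda p: p[1])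
--     groups = _chunk(pairs)
--     best = -1
--     for xs, ys in zip(groups, groups[1:]):
--         best = _merge_min(sorted(xs), sorted(ys), best)
--     return best
-- ===== Notes on version B (the rewrite author's own statement) =====
-- stated objective: alternative
-- what changed: A materialises every index pair between value-adjacent groups into one big list and then scans it for the minimum; B splits the value-sorted (index,value) list into equal-value runs and finds the minimum index distance of each adjacent run pair with a two-pointer merge over the sorted index lists, so no cross-product list is ever built (worst-case O(n log n) instead of O(n^2), but not measurably faster on the random timing inputs, where groups are small).
import Mathlib
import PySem

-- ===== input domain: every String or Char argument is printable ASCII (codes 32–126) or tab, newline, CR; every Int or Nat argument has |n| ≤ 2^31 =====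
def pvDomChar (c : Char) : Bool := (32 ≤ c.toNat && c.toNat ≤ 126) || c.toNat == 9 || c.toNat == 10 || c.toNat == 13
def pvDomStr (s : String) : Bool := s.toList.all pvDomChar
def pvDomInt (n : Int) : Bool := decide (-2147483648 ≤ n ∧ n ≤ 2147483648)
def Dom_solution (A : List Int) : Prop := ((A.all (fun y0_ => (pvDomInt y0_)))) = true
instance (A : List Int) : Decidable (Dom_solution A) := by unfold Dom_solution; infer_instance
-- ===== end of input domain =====

-- B replaces A's materialised cross-product of every value-adjacent index pair by a
-- two-pointer merge over the sorted index lists of adjacent equal-value runs (alternative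
-- algorithm: no cross-product list is ever built).

-- ===== PORT A =====
-- one loop step of A's scan over the value-sorted list: state = (prev, current, adjacent_pairs)
def solnStep (st : Option (List (Int × Int)) × Option (List (Int × Int)) × List (Int × Int))
    (e : Int × Int) : Option (List (Int × Int)) × Option (List (Int × Int)) × List (Int × Int) :=
  match st with
  | (prev, current, acc) =>
    match current with
    | none => (prev, some [e], acc)
    | some cur =>
      if e.2 = cur.headI.2 then (prev, some (cur ++ [e]), acc)
      else
        match prev with
        | none => (some cur, some [e], acc)
        | some pv => (some cur, some [e], acc ++ pv.flatMap (fun x => cur.map (fun y => (x.1, y.1))))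

def solution (A : List Int) : Int :=
  if A.length < 2 then -1
  else
    let A1 := (PySem.List.enumerate A).foldl (fun acc iv => acc ++ [iv]) []
    let A1s := PySem.List.sorted A1 (fun e => e.2) false
    let st := A1s.foldl solnStep (none, none, [])
    let adjacent_pairs :=
      match st.1 with
      | none => st.2.2
      | some pv => st.2.2 ++ pv.flatMap (fun (x : Int × Int) => (st.2.1.getD []).map (fun (y : Int × Int) => (x.1, y.1)))
    let min_pair := adjacent_pairs.foldl
      (fun (m : Option Int) (e : Int × Int) => match m with
        | none => some |e.1 - e.2|
        | some v => if |e.1 - e.2| < v then some |e.1 - e.2| else some v) none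
    match min_pair with
    | none => -1
    | some v => v

-- ===== PORT B =====
-- Source B _chunk: maximal runs of equal value in the sorted (index, value) list, kept as index lists
def chunkB : List (Int × Int) → List (List Int)
  | [] => []
  | p :: rest =>
    ((p :: rest.takeWhile (fun q => q.2 == p.2)).map (·.1)) ::
      chunkB (rest.dropWhile (fun q => q.2 == p.2))
  termination_by l => l.length
  decreasing_by
    have := List.length_dropWhile_le (fun q => q.2 == p.2) rest
    simp only [List.length_cons]
    omega

-- Source B _merge_min: two-pointer merge walk over two sorted index lists (-1 = no pair yet)
def mergeMin : List Int → List Int → Int → Int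
  | [], _, best => best
  | _ :: _, [], best => best
  | x :: xs, y :: ys, best =>
    let d := |x - y|
    let best' := if best = -1 ∨ d < best then d else best
    if x < y then mergeMin xs (y :: ys) best' else mergeMin (x :: xs) ys best'

def solution_alt (A : List Int) : Int :=
  if A.length < 2 then -1
  else
    let pairs := PySem.List.sorted (PySem.List.enumerate A) (fun p => p.2) false
    let groups := chunkB pairs
    (groups.zip groups.tail).foldl
      (fun best g =>
        mergeMin (PySem.List.sorted g.1 (fun x => x) false)
                 (PySem.List.sorted g.2 (fun x => x) false) best) (-1)

-- ===== PRECONDITION & SPEC =====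
def Spec_solution (A : List Int) (out : Int) : Prop := out = solution_alt A
instance (A : List Int) (out : Int) : Decidable (Spec_solution A out) := by unfold Spec_solution; infer_instance

-- ===== CLAIM (what is proved, stated in full; the proofs are below) =====
def Claim_equal_solution : Prop := ∀ (A : List Int), Dom_solution A → Spec_solution A (solution A)

-- ===== LEMMAS AND PROOFS =====

-- chunkP: like chunkB but keeping the (index, value) pairs of each maximal run
def chunkP : List (Int × Int) → List (List (Int × Int))
  | [] => []
  | p :: rest =>
    (p :: rest.takeWhile (fun q => q.2 == p.2)) :: chunkP (rest.dropWhile (fun q => q.2 == p.2))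
  termination_by l => l.length
  decreasing_by
    have := List.length_dropWhile_le (fun q => q.2 == p.2) rest
    simp only [List.length_cons]
    omega

-- all (index, index) pairs between two runs, in A's (x-major) order
def crossP (X Y : List (Int × Int)) : List (Int × Int) :=
  X.flatMap (fun x => Y.map (fun y => (x.1, y.1)))

-- A's adjacent_pairs, expressed over the run decomposition
def pairsOf (chunks : List (List (Int × Int))) : List (Int × Int) :=
  (chunks.zip chunks.tail).flatMap (fun g => crossP g.1 g.2)

-- the scan state A's loop reaches after consuming whole runs rest, having last seen pv and cur
def finishF : List (Int × Int) → List (Int × Int) → List (Int × Int) → List (List (Int × Int)) →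
    Option (List (Int × Int)) × Option (List (Int × Int)) × List (Int × Int)
  | pv, cur, acc, [] => (some pv, some cur, acc)
  | pv, cur, acc, C :: rest => finishF cur C (acc ++ crossP pv cur) rest

-- A's closing step after the loop
def postP (st : Option (List (Int × Int)) × Option (List (Int × Int)) × List (Int × Int)) :
    List (Int × Int) :=
  match st.1 with
  | none => st.2.2
  | some pv => st.2.2 ++ pv.flatMap (fun (x : Int × Int) => (st.2.1.getD []).map (fun (y : Int × Int) => (x.1, y.1)))

-- A's running-minimum step, on Option Int (none = no pair yet)
def ominStep (m : Option Int) (d : Int) : Option Int :=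
  match m with
  | none => some d
  | some v => if d < v then some d else some v

-- B's running-minimum step on the -1 sentinel
def stepS (b d : Int) : Int := if b = -1 ∨ d < b then d else b

def toSent (o : Option Int) : Int :=
  match o with
  | none => -1
  | some v => v

def validO (o : Option Int) : Prop := ∀ v, o = some v → 0 ≤ v

def allDiffs (xs ys : List Int) : List Int :=
  xs.flatMap (fun x => ys.map (fun y => |x - y|))

lemma chunkB_eq (l : List (Int × Int)) : chunkB l = (chunkP l).map (List.map (·.1)) := by
  induction l using chunkP.induct with
  | case1 => simp [chunkB, chunkP]
  | case2 p rest ih => rw [chunkB, chunkP]; simp [ih]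

lemma run_fold (R : List (Int × Int)) (prev : Option (List (Int × Int)))
    (cur acc : List (Int × Int)) (hR : ∀ e ∈ R, e.2 = cur.headI.2) (hcur : cur ≠ []) :
    R.foldl solnStep (prev, some cur, acc) = (prev, some (cur ++ R), acc) := by
  induction R generalizing cur with
  | nil => simp
  | cons e R ih =>
    have he : e.2 = cur.headI.2 := hR e (by simp)
    have hstep : solnStep (prev, some cur, acc) e = (prev, some (cur ++ [e]), acc) := by
      simp [solnStep, he]
    rw [List.foldl_cons, hstep]
    have hhead : (cur ++ [e]).headI = cur.headI := by
      cases cur with | nil => exact absurd rfl hcur | cons a t => rfl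
    rw [ih (cur ++ [e]) (fun x hx => by rw [hhead]; exact hR x (by simp [hx])) (by simp)]
    simp

lemma scan_go (L : List (Int × Int)) (pv cur acc : List (Int × Int))
    (hcur : cur ≠ [])
    (hhead : ∀ x ∈ L.head?, (x.2 == cur.headI.2) = false) :
    L.foldl solnStep (some pv, some cur, acc) = finishF pv cur acc (chunkP L) := by
  induction L using chunkP.induct generalizing pv cur acc with
  | case1 => simp [chunkP, finishF]
  | case2 p rest ih =>
    have hb : (p.2 == cur.headI.2) = false := hhead p (by simp)
    have hb' : ¬ (p.2 = cur.headI.2) := by simpa using hb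
    have hstep : solnStep (some pv, some cur, acc) p =
        (some cur, some [p], acc ++ crossP pv cur) := by
      simp [solnStep, hb', crossP]
    rw [List.foldl_cons, hstep]
    have hsplit : rest = rest.takeWhile (fun q => q.2 == p.2) ++ rest.dropWhile (fun q => q.2 == p.2) :=
      (List.takeWhile_append_dropWhile).symm
    conv_lhs => rw [hsplit]
    rw [List.foldl_append]
    rw [run_fold _ _ _ _ (fun e he => by simpa using (List.mem_takeWhile_imp he)) (by simp)]
    rw [ih _ _ _ (by simp) ?_]
    · rw [chunkP]; simp [finishF]
    · intro x hx
      have hne : (List.dropWhile (fun q => q.2 == p.2) rest) ≠ [] := by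
        cases h : List.dropWhile (fun q => q.2 == p.2) rest with
        | nil => rw [h] at hx; simp at hx
        | cons a t => simp
      have := List.head_dropWhile_not (fun q => q.2 == p.2) (l := rest) hne
      have hx' : x = (List.dropWhile (fun q => q.2 == p.2) rest).head hne := by
        have h2 := List.head?_eq_some_head hne
        rw [h2] at hx
        have hx2 : (List.dropWhile (fun q => q.2 == p.2) rest).head hne = x := by simpa using hx
        exact hx2.symm
      rw [hx']
      simpa using this

lemma scan_from_none (L : List (Int × Int)) (cur acc : List (Int × Int))
    (hhead : ∀ x ∈ L.head?, (x.2 == cur.headI.2) = false) :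
    L.foldl solnStep (none, some cur, acc) =
      match chunkP L with
      | [] => (none, some cur, acc)
      | C :: rest => finishF cur C acc rest := by
  cases L with
  | nil => simp [chunkP]
  | cons p rest =>
    have hb : (p.2 == cur.headI.2) = false := hhead p (by simp)
    have hb' : ¬ (p.2 = cur.headI.2) := by simpa using hb
    have hstep : solnStep (none, some cur, acc) p = (some cur, some [p], acc) := by
      simp [solnStep, hb']
    rw [List.foldl_cons, hstep]
    have hsplit : rest = rest.takeWhile (fun q => q.2 == p.2) ++ rest.dropWhile (fun q => q.2 == p.2) :=
      (List.takeWhile_append_dropWhile).symm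
    conv_lhs => rw [hsplit]
    rw [List.foldl_append]
    rw [run_fold _ _ _ _ (fun e he => by simpa using (List.mem_takeWhile_imp he)) (by simp)]
    rw [scan_go _ _ _ _ (by simp) ?_]
    · rw [chunkP]; simp
    · intro x hx
      have hne : (List.dropWhile (fun q => q.2 == p.2) rest) ≠ [] := by
        cases h : List.dropWhile (fun q => q.2 == p.2) rest with
        | nil => rw [h] at hx; simp at hx
        | cons a t => simp
      have := List.head_dropWhile_not (fun q => q.2 == p.2) (l := rest) hne
      have hx' : x = (List.dropWhile (fun q => q.2 == p.2) rest).head hne := by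
        have h2 := List.head?_eq_some_head hne
        rw [h2] at hx
        have hx2 : (List.dropWhile (fun q => q.2 == p.2) rest).head hne = x := by simpa using hx
        exact hx2.symm
      rw [hx']
      simpa using this

lemma finish_post (rest : List (List (Int × Int))) (pv cur acc : List (Int × Int)) :
    postP (finishF pv cur acc rest) = acc ++ crossP pv cur ++ pairsOf (cur :: rest) := by
  induction rest generalizing pv cur acc with
  | nil => simp [finishF, postP, pairsOf, crossP]
  | cons C rest ih =>
    rw [finishF, ih]
    simp [pairsOf, crossP]

lemma pairs_char (L : List (Int × Int)) :
    postP (L.foldl solnStep (none, none, [])) = pairsOf (chunkP L) := by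
  cases L with
  | nil => simp [chunkP, postP, pairsOf]
  | cons p rest =>
    have hstep : solnStep (none, none, []) p = (none, some [p], []) := rfl
    rw [List.foldl_cons, hstep]
    have hsplit : rest = rest.takeWhile (fun q => q.2 == p.2) ++ rest.dropWhile (fun q => q.2 == p.2) :=
      (List.takeWhile_append_dropWhile).symm
    conv_lhs => rw [hsplit]
    rw [List.foldl_append]
    rw [run_fold _ _ _ _ (fun e he => by simpa using (List.mem_takeWhile_imp he)) (by simp)]
    rw [scan_from_none _ _ _ ?_]
    · cases h : chunkP (List.dropWhile (fun q => q.2 == p.2) rest) with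
      | nil => rw [chunkP, h]; simp [postP, pairsOf]
      | cons C rest' => rw [chunkP, h]; simp only [finish_post]; simp [pairsOf, crossP]
    · intro x hx
      have hne : (List.dropWhile (fun q => q.2 == p.2) rest) ≠ [] := by
        cases h : List.dropWhile (fun q => q.2 == p.2) rest with
        | nil => rw [h] at hx; simp at hx
        | cons a t => simp
      have := List.head_dropWhile_not (fun q => q.2 == p.2) (l := rest) hne
      have hx' : x = (List.dropWhile (fun q => q.2 == p.2) rest).head hne := by
        have h2 := List.head?_eq_some_head hne
        rw [h2] at hx
        have hx2 : (List.dropWhile (fun q => q.2 == p.2) rest).head hne = x := by simpa using hx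
        exact hx2.symm
      rw [hx']
      simpa using this

lemma validO_fold (l : List Int) (o : Option Int) (ho : validO o) (hl : ∀ d ∈ l, 0 ≤ d) :
    validO (l.foldl ominStep o) := by
  induction l generalizing o with
  | nil => exact ho
  | cons d l ih =>
    refine ih _ ?_ (fun e he => hl e (by simp [he]))
    have hd := hl d (by simp)
    cases o with
    | none => intro v hv; simp [ominStep] at hv; omega
    | some w =>
      have hw := ho w rfl
      intro v hv
      simp [ominStep] at hv
      split at hv <;> simp_all

lemma sent_fold (l : List Int) (o : Option Int) (ho : validO o) (hl : ∀ d ∈ l, 0 ≤ d) :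
    l.foldl stepS (toSent o) = toSent (l.foldl ominStep o) := by
  induction l generalizing o with
  | nil => rfl
  | cons d l ih =>
    have hd := hl d (by simp)
    have hstep : stepS (toSent o) d = toSent (ominStep o d) := by
      cases o with
      | none => simp [stepS, toSent, ominStep]
      | some w =>
        have hw := ho w rfl
        simp only [stepS, toSent, ominStep]
        split_ifs with h1 h2 h2 <;> simp_all
    rw [List.foldl_cons, List.foldl_cons, hstep]
    refine ih _ ?_ (fun e he => hl e (by simp [he]))
    cases o with
    | none => intro v hv; simp [ominStep] at hv; omega
    | some w =>
      have hw := ho w rfl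
      intro v hv; simp [ominStep] at hv; split at hv <;> simp_all

lemma drop_dominated (P : List Int) (b : Int) (hb : b ≠ -1) (hP : ∀ e ∈ P, b ≤ e) :
    P.foldl stepS b = b := by
  induction P with
  | nil => rfl
  | cons e P ih =>
    have he := hP e (by simp)
    have : stepS b e = b := by simp [stepS]; omega
    rw [List.foldl_cons, this]
    exact ih (fun x hx => hP x (by simp [hx]))

lemma stepS_fold_le (l : List Int) (b : Int) (hb : 0 ≤ b) (hl : ∀ d ∈ l, 0 ≤ d) :
    0 ≤ l.foldl stepS b ∧ l.foldl stepS b ≤ b := by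
  induction l generalizing b with
  | nil => exact ⟨hb, le_refl b⟩
  | cons d l ih =>
    have hd := hl d (by simp)
    have h1 : 0 ≤ stepS b d ∧ stepS b d ≤ b := by unfold stepS; split_ifs <;> omega
    have := ih (stepS b d) h1.1 (fun e he => hl e (by simp [he]))
    exact ⟨this.1, le_trans this.2 h1.2⟩

lemma ominStep_eq (m : Option Int) (d : Int) :
    ominStep m d = some (match m with | none => d | some v => min d v) := by
  cases m with
  | none => rfl
  | some v => simp only [ominStep, min_def]; split_ifs <;> simp <;> omega

lemma ominStep_rcomm (m : Option Int) (a b : Int) :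
    ominStep (ominStep m a) b = ominStep (ominStep m b) a := by
  cases m <;> simp [ominStep_eq, min_comm, min_left_comm]

lemma perm_fold_omin {l1 l2 : List Int} (h : l1.Perm l2) (o : Option Int) :
    l1.foldl ominStep o = l2.foldl ominStep o := by
  letI : RightCommutative ominStep := ⟨fun m a b => ominStep_rcomm m a b⟩
  exact h.foldl_eq o

lemma perm_col (xs : List Int) (y : Int) (ys : List Int) :
    (allDiffs xs (y :: ys)).Perm ((xs.map (fun x => |x - y|)) ++ allDiffs xs ys) := by
  induction xs with
  | nil => simp [allDiffs]
  | cons x xs ih =>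
    have h1 : allDiffs (x :: xs) (y :: ys) =
        |x - y| :: ((ys.map (fun y' => |x - y'|)) ++ allDiffs xs (y :: ys)) := by
      simp [allDiffs]
    have h2 : (((x :: xs).map (fun x => |x - y|)) ++ allDiffs (x :: xs) ys) =
        |x - y| :: ((xs.map (fun x => |x - y|)) ++ ((ys.map (fun y' => |x - y'|)) ++ allDiffs xs ys)) := by
      simp [allDiffs]
    rw [h1, h2]
    refine List.Perm.cons _ ?_
    exact (List.Perm.append_left _ ih).trans (List.perm_append_comm_assoc _ _ _)

lemma allDiffs_nonneg (xs ys : List Int) : ∀ d ∈ allDiffs xs ys, 0 ≤ d := by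
  intro d hd
  simp [allDiffs, List.mem_flatMap, List.mem_map] at hd
  obtain ⟨x, -, y, -, hxy⟩ := hd
  rw [← hxy]; positivity

lemma perm_allDiffs {xs xs' ys ys' : List Int} (h1 : xs.Perm xs') (h2 : ys.Perm ys') :
    (allDiffs xs ys).Perm (allDiffs xs' ys') := by
  refine List.Perm.trans (List.Perm.flatMap_right _ h1) ?_
  exact List.Perm.flatMap_left _ (fun x _ => h2.map _)

lemma perm_fold_stepS {l1 l2 : List Int} (h : l1.Perm l2) (b : Int)
    (hb : b = -1 ∨ 0 ≤ b) (hl : ∀ d ∈ l1, 0 ≤ d) :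
    l1.foldl stepS b = l2.foldl stepS b := by
  have hl2 : ∀ d ∈ l2, (0:Int) ≤ d := fun d hd => hl d (h.mem_iff.mpr hd)
  rcases hb with hb | hb
  · subst hb
    calc l1.foldl stepS (-1) = toSent (l1.foldl ominStep none) :=
          sent_fold l1 none (fun v hv => by cases hv) hl
      _ = toSent (l2.foldl ominStep none) := by rw [perm_fold_omin h]
      _ = l2.foldl stepS (-1) := (sent_fold l2 none (fun v hv => by cases hv) hl2).symm
  · calc l1.foldl stepS b = toSent (l1.foldl ominStep (some b)) :=
          sent_fold l1 (some b) (fun v hv => by cases hv; exact hb) hl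
      _ = toSent (l2.foldl ominStep (some b)) := by rw [perm_fold_omin h]
      _ = l2.foldl stepS b := (sent_fold l2 (some b) (fun v hv => by cases hv; exact hb) hl2).symm

lemma merge_eq : ∀ (xs ys : List Int) (b : Int), xs.Pairwise (· ≤ ·) → ys.Pairwise (· ≤ ·) →
    (b = -1 ∨ 0 ≤ b) → mergeMin xs ys b = (allDiffs xs ys).foldl stepS b
  | [], ys, b, _, _, _ => by simp [mergeMin, allDiffs]
  | x :: xs, [], b, _, _, _ => by
    have hnil : allDiffs (x :: xs) [] = [] := by simp [allDiffs]
    rw [mergeMin, hnil]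
    rfl
  | x :: xs, y :: ys, b, hxs, hys, hb => by
    have hd : (0:Int) ≤ |x - y| := abs_nonneg _
    have hb1 : 0 ≤ stepS b |x - y| := by unfold stepS; split_ifs <;> omega
    have hb2 : stepS b |x - y| ≤ |x - y| := by
      unfold stepS; split_ifs with hfl <;> omega
    have hsplit : allDiffs (x :: xs) (y :: ys) =
        |x - y| :: ((ys.map (fun y' => |x - y'|)) ++ allDiffs xs (y :: ys)) := by
      simp [allDiffs]
    rw [mergeMin, hsplit]
    simp only [List.foldl_cons, List.foldl_append]
    have hstep : (if b = -1 ∨ |x - y| < b then |x - y| else b) = stepS b |x - y| := rfl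
    rw [hstep]
    by_cases hxy : x < y
    · rw [if_pos hxy]
      have hrow : (ys.map (fun y' => |x - y'|)).foldl stepS (stepS b |x - y|) = stepS b |x - y| := by
        refine drop_dominated _ _ (by omega) ?_
        intro e he
        simp only [List.mem_map] at he
        obtain ⟨y', hy', rfl⟩ := he
        have hyy : y ≤ y' := (List.pairwise_cons.mp hys).1 y' hy'
        have e1 : |x - y'| = y' - x := by rw [abs_of_nonpos (by omega)]; ring
        have e2 : |x - y| = y - x := by rw [abs_of_nonpos (by omega)]; ring
        omega
      rw [merge_eq xs (y :: ys) _ (List.Pairwise.sublist (List.sublist_cons_self x xs) hxs) hys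
        (Or.inr hb1), hrow]
    · rw [if_neg hxy]
      rw [merge_eq (x :: xs) ys _ hxs (List.Pairwise.sublist (List.sublist_cons_self y ys) hys)
        (Or.inr hb1)]
      have hxsplit : allDiffs (x :: xs) ys = (ys.map (fun y' => |x - y'|)) ++ allDiffs xs ys := by
        simp [allDiffs]
      rw [hxsplit, List.foldl_append]
      set b2 := (ys.map (fun y' => |x - y'|)).foldl stepS (stepS b |x - y|) with hb2def
      have hrownn : ∀ d ∈ ys.map (fun y' => |x - y'|), (0:Int) ≤ d := by
        intro d hd
        simp only [List.mem_map] at hd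
        obtain ⟨y', _, rfl⟩ := hd
        exact abs_nonneg _
      have hb2le := stepS_fold_le (ys.map (fun y' => |x - y'|)) _ hb1 hrownn
      have hcol : (xs.map (fun x' => |x' - y|)).foldl stepS b2 = b2 := by
        refine drop_dominated _ _ (by omega) ?_
        intro e he
        simp only [List.mem_map] at he
        obtain ⟨x', hx', rfl⟩ := he
        have hxx : x ≤ x' := (List.pairwise_cons.mp hxs).1 x' hx'
        have e1 : |x' - y| = x' - y := by rw [abs_of_nonneg (by omega)]
        have e2 : |x - y| = x - y := by rw [abs_of_nonneg (by omega)]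
        omega
      rw [perm_fold_stepS (perm_col xs y ys) b2 (Or.inr hb2le.1)
        (allDiffs_nonneg xs (y :: ys)), List.foldl_append, hcol]

lemma valfold (z : List (List (Int × Int) × List (Int × Int))) (o : Option Int) (ho : validO o) :
    z.foldl
      (fun b g =>
        mergeMin (PySem.List.sorted (g.1.map (·.1)) (fun x => x) false)
                 (PySem.List.sorted (g.2.map (·.1)) (fun x => x) false) b) (toSent o) =
    toSent ((z.flatMap (fun g => (crossP g.1 g.2).map (fun e => |e.1 - e.2|))).foldl ominStep o) := by
  induction z generalizing o with
  | nil => rfl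
  | cons g z ih =>
    rw [List.foldl_cons, List.flatMap_cons, List.foldl_append]
    have hX := PySem.List.sorted_pairwise (g.1.map (·.1)) (fun x => x)
    have hY := PySem.List.sorted_pairwise (g.2.map (·.1)) (fun x => x)
    have hb : toSent o = -1 ∨ 0 ≤ toSent o := by
      cases o with
      | none => exact Or.inl rfl
      | some v => exact Or.inr (ho v rfl)
    have hcm : (crossP g.1 g.2).map (fun e : Int × Int => |e.1 - e.2|) =
        allDiffs (g.1.map (·.1)) (g.2.map (·.1)) := by
      simp [crossP, allDiffs, List.map_flatMap, List.flatMap_map, List.map_map, Function.comp_def]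
    have hperm : (allDiffs (PySem.List.sorted (g.1.map (·.1)) (fun x => x) false)
        (PySem.List.sorted (g.2.map (·.1)) (fun x => x) false)).Perm
        (allDiffs (g.1.map (·.1)) (g.2.map (·.1))) :=
      perm_allDiffs (PySem.List.sorted_perm _ _ _) (PySem.List.sorted_perm _ _ _)
    have hmerge : mergeMin (PySem.List.sorted (g.1.map (·.1)) (fun x => x) false)
        (PySem.List.sorted (g.2.map (·.1)) (fun x => x) false) (toSent o) =
        toSent (((crossP g.1 g.2).map (fun e => |e.1 - e.2|)).foldl ominStep o) := by
      rw [merge_eq _ _ _ hX hY hb]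
      rw [perm_fold_stepS hperm _ hb (allDiffs_nonneg _ _)]
      rw [← hcm]
      exact sent_fold _ _ ho (by rw [hcm]; exact allDiffs_nonneg _ _)
    rw [hmerge]
    exact ih _ (validO_fold _ _ ho (by rw [hcm]; exact allDiffs_nonneg _ _))

lemma A1_eq (A : List Int) :
    (PySem.List.enumerate A).foldl (fun acc iv => acc ++ [iv]) [] = PySem.List.enumerate A := by
  simpa using PySem.List.foldl_append_singleton (PySem.List.enumerate A) []

lemma main_eq (A : List Int) : solution A = solution_alt A := by
  unfold solution solution_alt
  by_cases h : A.length < 2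
  · rw [if_pos h, if_pos h]
  · rw [if_neg h, if_neg h, A1_eq]
    show toSent ((postP ((PySem.List.sorted (PySem.List.enumerate A) (fun e => e.2) false).foldl
        solnStep (none, none, []))).foldl (fun (m : Option Int) (e : Int × Int) => ominStep m |e.1 - e.2|) none) =
      ((chunkB (PySem.List.sorted (PySem.List.enumerate A) (fun p => p.2) false)).zip
        (chunkB (PySem.List.sorted (PySem.List.enumerate A) (fun p => p.2) false)).tail).foldl
        (fun best g => mergeMin (PySem.List.sorted g.1 (fun x => x) false)
          (PySem.List.sorted g.2 (fun x => x) false) best) (-1)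
    rw [pairs_char, chunkB_eq, ← List.map_tail, List.zip_map, List.foldl_map]
    have hv := valfold (((chunkP (PySem.List.sorted (PySem.List.enumerate A) (fun p => p.2) false))).zip
      (chunkP (PySem.List.sorted (PySem.List.enumerate A) (fun p => p.2) false)).tail) none
      (fun v hv => by cases hv)
    refine Eq.trans ?_ (Eq.trans hv.symm rfl)
    rw [← List.foldl_map (f := fun e : Int × Int => |e.1 - e.2|) (g := ominStep)]
    congr 1
    simp [pairsOf, List.map_flatMap]

-- ===== VERDICT (by name: the statement is the Claim_ definition above) =====
theorem solution_spec : Claim_equal_solution := by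
  intro A _
  unfold Spec_solution
  exact main_eq A
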